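-- pv_equiv track=rewrite | github.com/jleclanche/python-bna | bna.py | bytesToRestoreCode
-- ===== SOURCE A (Python) =====
-- def bytesToRestoreCode(digest):
-- 	ret = []
-- 	for i in digest:
-- 		# Python2 compat
-- 		if isinstance(i, str):
-- 			i = ord(i)
--
-- 		c = i & 0x1f
-- 		if c < 10:
-- 			c += 48
-- 		else:
-- 			c += 55
-- 			if c > 72: # I
-- 				c += 1
-- 			if c > 75: # L
-- 				c += 1
-- 			if c > 78: # O
-- 				c += 1
-- 			if c > 82: # S
-- 				c += 1
-- 		ret.append(chr(c))
--
-- 	return "".join(ret)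
-- ===== SOURCE B (Python) =====
-- def bytesToRestoreCode(digest):
-- 	def _symbol(v):
-- 		# Walk ASCII codes upward from '0' and return the v-th (0-based) code
-- 		# that is a digit or an uppercase letter other than I, L, O, S.
-- 		code = 48
-- 		while True:
-- 			if 48 <= code <= 57 or (65 <= code <= 90 and code not in (73, 76, 79, 83)):
-- 				if v == 0:
-- 					return chr(code)
-- 				v -= 1
-- 			code += 1
--
-- 	out = ""
-- 	for i in digest:
-- 		# Python2 compat
-- 		if isinstance(i, str):
-- 			i = ord(i)
-- 		out += _symbol(i & 0x1f)
-- 	return out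
-- ===== Notes on version B (the rewrite author's own statement) =====
-- stated objective: alternative
-- what changed: Instead of A's constant-time arithmetic that adds cumulative offsets for the skipped letters I,L,O,S, B finds each output character by linearly scanning ASCII codes upward from '0' and returning the v-th code that is a digit or an uppercase letter other than I,L,O,S, accumulating the result by string concatenation instead of list-append-then-join.
import Mathlib
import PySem

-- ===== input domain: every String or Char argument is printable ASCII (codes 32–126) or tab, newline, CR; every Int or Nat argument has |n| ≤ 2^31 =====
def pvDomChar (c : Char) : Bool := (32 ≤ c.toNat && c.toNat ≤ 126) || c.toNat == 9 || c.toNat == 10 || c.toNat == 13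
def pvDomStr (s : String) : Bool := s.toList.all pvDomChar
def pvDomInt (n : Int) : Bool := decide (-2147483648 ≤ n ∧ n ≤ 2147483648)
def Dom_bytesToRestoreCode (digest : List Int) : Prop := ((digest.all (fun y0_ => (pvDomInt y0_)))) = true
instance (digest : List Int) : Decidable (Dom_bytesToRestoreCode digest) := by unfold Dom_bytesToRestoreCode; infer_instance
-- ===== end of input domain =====

-- B replaces A's arithmetic with cumulative skip offsets by a linear scan over ASCII codes
-- that selects the v-th allowed character (digit or uppercase letter other than I,L,O,S),
-- building the output by string concatenation (objective: alternative).

-- ===== PORT A =====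
-- Python's `i & 0x1f` on an arbitrary int is exactly `Int.emod i 32` (floored, result in [0,32));
-- the Python2 `isinstance(i, str)` branch never fires for int inputs and is dropped.
def pvChrA (i : Int) : Char :=
  let c := Int.emod i 32
  let c :=
    if c < 10 then c + 48
    else
      let c := c + 55
      let c := if c > 72 then c + 1 else c  -- I
      let c := if c > 75 then c + 1 else c  -- L
      let c := if c > 78 then c + 1 else c  -- O
      if c > 82 then c + 1 else c           -- S
  Char.ofNat c.toNat  -- chr(c); c is always in printable ASCII range here

def bytesToRestoreCode (digest : List Int) : String :=
  String.ofList (digest.map pvChrA)  -- the loop appending chr(c) then "".join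

-- ===== PORT B =====
-- Source B's `while True` scan from code 48; v ≤ 31 always hits within codes 48..90, so
-- fuel 43 only makes the same computation total and is never exhausted on reachable calls.
def pvSymbol : Nat → Int → Int → Char
  | 0, _, _ => ' '
  | fuel + 1, code, v =>
    if (48 ≤ code ∧ code ≤ 57) ∨
       (65 ≤ code ∧ code ≤ 90 ∧ code ≠ 73 ∧ code ≠ 76 ∧ code ≠ 79 ∧ code ≠ 83) then
      if v = 0 then Char.ofNat code.toNat
      else pvSymbol fuel (code + 1) (v - 1)
    else pvSymbol fuel (code + 1) v

def bytesToRestoreCode_alt (digest : List Int) : String :=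
  digest.foldl (fun out i => out ++ String.singleton (pvSymbol 43 48 (Int.emod i 32))) ""

-- ===== PRECONDITION & SPEC =====
def Spec_bytesToRestoreCode (digest : List Int) (out : String) : Prop := out = bytesToRestoreCode_alt digest
instance (digest : List Int) (out : String) : Decidable (Spec_bytesToRestoreCode digest out) := by unfold Spec_bytesToRestoreCode; infer_instance

-- ===== CLAIM (what is proved, stated in full; the proofs are below) =====
def Claim_equal_bytesToRestoreCode : Prop := ∀ (digest : List Int), Dom_bytesToRestoreCode digest → Spec_bytesToRestoreCode digest (bytesToRestoreCode digest)

-- ===== LEMMAS AND PROOFS =====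
theorem pvChr_eq (i : Int) : pvChrA i = pvSymbol 43 48 (Int.emod i 32) := by
  have h0 : 0 ≤ Int.emod i 32 := Int.emod_nonneg i (by norm_num)
  have h1 : Int.emod i 32 < 32 := Int.emod_lt_of_pos i (by norm_num)
  unfold pvChrA
  generalize Int.emod i 32 = c at *
  interval_cases c <;> decide

theorem foldl_singleton (f : Int → Char) (l : List Int) (acc : String) :
    l.foldl (fun out i => out ++ String.singleton (f i)) acc = acc ++ String.ofList (l.map f) := by
  induction l generalizing acc with
  | nil => apply String.toList_injective; simp
  | cons x xs ih =>
      simp only [List.foldl_cons, List.map_cons, ih]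
      apply String.toList_injective
      simp

-- ===== VERDICT (by name: the statement is the Claim_ definition above) =====
theorem bytesToRestoreCode_spec : Claim_equal_bytesToRestoreCode := by
  intro digest _
  show _ = _
  rw [bytesToRestoreCode_alt, foldl_singleton]
  simp [bytesToRestoreCode, List.map_congr_left fun i _ => pvChr_eq i]
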